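-- pv_equiv track=rewrite | github.com/christofmuc/KnobKraft-orm | adaptations/Behringer_Wave.py | friendlyProgramName
-- ===== SOURCE A (Python) =====
-- from typing import Optional, Generator, Any, cast
--
-- BANK_DESC = [
-- 	{"bank": 0, "name": "A", "size": 100, "type": "Patch"},
-- 	{"bank": 1, "name": "B", "size": 100, "type": "Patch"},
-- ]
--
-- default_edit_name = '(Edit Buffer)'
--
-- def bankDescriptors() -> list[dict]:
-- 	return BANK_DESC
--
-- def friendlyBankName(bank_number: int) -> Optional[str]:
-- 	## bankDescriptors().find(x => x.bank==bank_number)?.name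
-- 	return next((x['name'] for x in bankDescriptors() if x['bank'] == bank_number), None)
--
-- def friendlyProgramName(OrmPatchNo: int) -> str:
-- 	if OrmPatchNo < 0:
-- 		## edit buffer
-- 		return default_edit_name
-- 	maxNo = sum(x['size'] for x in bankDescriptors() if x['type'] == 'Patch') -1
-- 	if OrmPatchNo > maxNo:
-- 		raise Exception("Program# %d exceeds max %d" % (OrmPatchNo, maxNo))
-- 	n_per_bank = bankDescriptors()[0]["size"]
-- 	bank = OrmPatchNo // n_per_bank
-- 	slot = OrmPatchNo % n_per_bank
-- 	program_name = '%s%02d' % (friendlyBankName(bank), slot) ## 0-based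
-- 	return program_name
-- ===== SOURCE B (Python) =====
-- default_edit_name = '(Edit Buffer)'
--
-- BANK_DESC = [
-- 	{"bank": 0, "name": "A", "size": 100, "type": "Patch"},
-- 	{"bank": 1, "name": "B", "size": 100, "type": "Patch"},
-- ]
--
-- def bankDescriptors() -> list[dict]:
-- 	return BANK_DESC
--
-- def friendlyProgramName(OrmPatchNo: int) -> str:
-- 	if OrmPatchNo < 0:
-- 		return default_edit_name
-- 	maxNo = sum(x['size'] for x in bankDescriptors() if x['type'] == 'Patch') - 1
-- 	if OrmPatchNo > maxNo:
-- 		raise Exception("Program# %d exceeds max %d" % (OrmPatchNo, maxNo))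
-- 	rem = OrmPatchNo
-- 	for desc in bankDescriptors():
-- 		if rem < desc['size']:
-- 			return '%s%02d' % (desc['name'], rem)
-- 		rem -= desc['size']
-- 	raise Exception("unreachable")
-- ===== Notes on version B (the rewrite author's own statement) =====
-- stated objective: alternative
-- what changed: Replaces the div/mod bank-slot computation plus a bank-number lookup with a single walk over the bank descriptors that subtracts each bank's size from a running remainder until the owning bank is found.
import Mathlib
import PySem

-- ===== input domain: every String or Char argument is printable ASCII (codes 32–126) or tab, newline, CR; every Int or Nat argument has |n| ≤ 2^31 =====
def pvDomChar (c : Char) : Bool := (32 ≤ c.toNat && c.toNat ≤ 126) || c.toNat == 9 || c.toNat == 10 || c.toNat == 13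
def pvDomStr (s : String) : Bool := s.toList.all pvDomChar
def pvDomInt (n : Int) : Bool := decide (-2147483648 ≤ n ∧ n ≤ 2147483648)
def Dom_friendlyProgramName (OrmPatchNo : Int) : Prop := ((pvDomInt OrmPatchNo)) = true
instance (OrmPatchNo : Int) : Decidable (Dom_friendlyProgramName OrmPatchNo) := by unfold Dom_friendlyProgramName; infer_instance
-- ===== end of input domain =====

-- B walks the bank-descriptor list subtracting sizes instead of computing bank/slot by // and %; return value equivalent, no speed claim.

-- ===== PORT A =====
-- BANK_DESC entries as (bank, name, size, type)
def bankDesc : List (Int × String × Int × String) :=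
  [(0, "A", 100, "Patch"), (1, "B", 100, "Patch")]

def defaultEditName : String := "(Edit Buffer)"

-- '%02d' for the slot (0 ≤ slot < 100 on all admitted inputs)
def pad2 (slot : Int) : String :=
  if slot < 10 then "0" ++ PySem.Int.toStr slot else PySem.Int.toStr slot

def friendlyBankName (bank_number : Int) : Option String :=
  (bankDesc.find? (fun x => x.1 == bank_number)).map (fun x => x.2.1)

def friendlyProgramName (OrmPatchNo : Int) : String :=
  if OrmPatchNo < 0 then defaultEditName
  else
    let maxNo := (bankDesc.foldl (fun acc x => if x.2.2.2 == "Patch" then acc + x.2.2.1 else acc) 0) - 1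
    if OrmPatchNo > maxNo then ""  -- Python raises here; excluded by Pre_
    else
      let n_per_bank := ((bankDesc.headD (0, "", 0, "")).2.2.1)
      let bank := PySem.Int.floordiv OrmPatchNo n_per_bank
      let slot := PySem.Int.mod OrmPatchNo n_per_bank
      (match friendlyBankName bank with | some s => s | none => "None") ++ pad2 slot

-- ===== PORT B =====
-- walk the descriptors, subtracting each bank's size from the remainder
def altLoop : List (Int × String × Int × String) → Int → String
  | [], _ => ""  -- Python raises here; unreachable within Pre_
  | x :: xs, rem => if rem < x.2.2.1 then x.2.1 ++ pad2 rem else altLoop xs (rem - x.2.2.1)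

def friendlyProgramName_alt (OrmPatchNo : Int) : String :=
  if OrmPatchNo < 0 then defaultEditName
  else
    let maxNo := (bankDesc.foldl (fun acc x => if x.2.2.2 == "Patch" then acc + x.2.2.1 else acc) 0) - 1
    if OrmPatchNo > maxNo then ""  -- Python raises here; excluded by Pre_
    else altLoop bankDesc OrmPatchNo

-- ===== PRECONDITION & SPEC =====
-- Python A raises Exception when OrmPatchNo exceeds the highest valid program number (summed Patch-bank sizes minus one); exactly those inputs are excluded.
def Pre_friendlyProgramName (OrmPatchNo : Int) : Prop := OrmPatchNo ≤ 199
instance (OrmPatchNo : Int) : Decidable (Pre_friendlyProgramName OrmPatchNo) := by unfold Pre_friendlyProgramName; infer_instance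
def pvWitness_friendlyProgramName : Int := 123

def Spec_friendlyProgramName (OrmPatchNo : Int) (out : String) : Prop := out = friendlyProgramName_alt OrmPatchNo
instance (OrmPatchNo : Int) (out : String) : Decidable (Spec_friendlyProgramName OrmPatchNo out) := by unfold Spec_friendlyProgramName; infer_instance

-- ===== CLAIM (what is proved, stated in full; the proofs are below) =====
def Claim_equal_friendlyProgramName : Prop := ∀ (OrmPatchNo : Int), Dom_friendlyProgramName OrmPatchNo → Pre_friendlyProgramName OrmPatchNo → Spec_friendlyProgramName OrmPatchNo (friendlyProgramName OrmPatchNo)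

-- ===== LEMMAS AND PROOFS =====
-- ===== VERDICT (by name: the statement is the Claim_ definition above) =====
theorem friendlyProgramName_spec : Claim_equal_friendlyProgramName := by
  intro n _ hpre
  unfold Pre_friendlyProgramName at hpre
  unfold Spec_friendlyProgramName friendlyProgramName friendlyProgramName_alt
  by_cases hneg : n < 0
  · simp [hneg]
  · push Not at hneg
    by_cases hlo : n < 100
    · simp [bankDesc, altLoop, friendlyBankName, hlo, show n / 100 = 0 by omega,
        show n % 100 = n by omega, show ¬ 199 < n by omega]
    · push Not at hlo
      simp [bankDesc, altLoop, friendlyBankName, show n / 100 = 1 by omega,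
        show n % 100 = n - 100 by omega, show ¬ 199 < n by omega,
        show ¬ n < 100 by omega, show n - 100 < 100 by omega]
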